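-- pv_equiv track=rewrite | github.com/limits220284/CP | leetcode/2435.矩阵中和能被 K 整除的路径.py | numberOfPaths
-- ===== SOURCE A (Python) =====
-- from typing import List
--
-- def numberOfPaths(grid: List[List[int]], k: int) -> int:
--     mod = 10 ** 9 + 7
--     # k只有50，直接网格动态规划
--     # 定义三维dp,能整除k，就是%k为零
--     m, n = len(grid), len(grid[0])
--     f = [[[0] * k for _ in range(n+1)] for _ in range(m+1)]
--     f[0][0][grid[0][0] % k] += 1
--     for i in range(m):
--         for j in range(n):
--             for t in range(k):
--                 if j + 1 < n: f[i][j+1][(t + grid[i][j+1]) % k] += f[i][j][t]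
--                 if i + 1 < m: f[i+1][j][(t + grid[i+1][j]) % k] += f[i][j][t]
--
--     return f[m-1][n-1][0] % mod
-- ===== SOURCE B (Python) =====
-- from typing import List
--
-- def numberOfPaths(grid: List[List[int]], k: int) -> int:
--     # Pull-style memoized recursion: dp(i, j, r) = number of paths from (0, 0)
--     # to (i, j) whose sum is r mod k.  The warm-up loops fill the memo in
--     # topological order so the recursion never goes deeper than one level.
--     mod = 10 ** 9 + 7
--     m, n = len(grid), len(grid[0])
--     memo = [[[None] * k for _ in range(n)] for _ in range(m)]
--     def dp(i, j, r):
--         if i < 0 or j < 0: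
--             return 0
--         v = memo[i][j][r]
--         if v is not None:
--             return v
--         if i == 0 and j == 0:
--             v = 1 if r == grid[0][0] % k else 0
--         else:
--             p = (r - grid[i][j]) % k
--             v = dp(i - 1, j, p) + dp(i, j - 1, p)
--         memo[i][j][r] = v
--         return v
--     for i in range(m):
--         for j in range(n):
--             for r in range(k):
--                 dp(i, j, r)
--     return dp(m - 1, n - 1, 0) % mod
-- ===== Notes on version B (the rewrite author's own statement) =====
-- stated objective: alternative
-- what changed: A's forward push-DP, which scatters '+=' updates from each state of a full (m+1) x (n+1) x k table into its right and down neighbours, is replaced by a pull-style memoized recursion dp(i,j,r) = dp(i-1,j,(r-grid[i][j])%k) + dp(i,j-1,(r-grid[i][j])%k) that gathers each state's value from its two predecessors and writes it once; the answer is dp(m-1,n-1,0) % (10**9+7).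
import Mathlib
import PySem

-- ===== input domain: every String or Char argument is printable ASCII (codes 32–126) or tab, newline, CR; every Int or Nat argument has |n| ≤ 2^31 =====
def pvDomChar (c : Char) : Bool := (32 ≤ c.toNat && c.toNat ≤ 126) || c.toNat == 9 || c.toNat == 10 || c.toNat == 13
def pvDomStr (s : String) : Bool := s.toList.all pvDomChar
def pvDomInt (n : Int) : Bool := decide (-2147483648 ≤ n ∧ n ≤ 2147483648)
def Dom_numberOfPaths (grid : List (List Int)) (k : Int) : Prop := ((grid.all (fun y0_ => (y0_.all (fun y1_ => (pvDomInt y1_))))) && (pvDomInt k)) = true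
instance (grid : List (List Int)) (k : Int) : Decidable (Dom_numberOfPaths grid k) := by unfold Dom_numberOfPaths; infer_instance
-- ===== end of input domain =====

-- B replaces A's forward push-DP over a full 3-D table by a pull-style memoized
-- recursion on (i, j, remainder); an alternative decomposition, same O(m*n*k) cost.

-- ===== PORT A =====
-- grid[i][j]; exact on Pre_ (every access is in range there)
def pvG (grid : List (List Int)) (i j : Int) : Int :=
  PySem.List.pyGetD (PySem.List.pyGetD grid i []) j 0

-- f[i][j][t] read and write (all accesses are in range on Pre_)
def pvGet3 (f : List (List (List Int))) (i j t : Int) : Int :=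
  PySem.List.pyGetD (PySem.List.pyGetD (PySem.List.pyGetD f i []) j []) t 0

def pvSet3 (f : List (List (List Int))) (i j t v : Int) : List (List (List Int)) :=
  let row := PySem.List.pyGetD f i []
  let cell := PySem.List.pyGetD row j []
  PySem.List.pySetD f i (PySem.List.pySetD row j (PySem.List.pySetD cell t v))

-- body of A's innermost `for t in range(k)` loop: the two `+=` pushes
def pvStepL (grid : List (List Int)) (k m n i j : Int)
    (f : List (List (List Int))) (t : Int) : List (List (List Int)) :=
  let f1 := if j + 1 < n then
      let T := PySem.Int.mod (t + pvG grid i (j+1)) k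
      pvSet3 f i (j+1) T (pvGet3 f i (j+1) T + pvGet3 f i j t)
    else f
  if i + 1 < m then
      let T := PySem.Int.mod (t + pvG grid (i+1) j) k
      pvSet3 f1 (i+1) j T (pvGet3 f1 (i+1) j T + pvGet3 f1 i j t)
  else f1

def numberOfPaths (grid : List (List Int)) (k : Int) : Int :=
  let md : Int := 10 ^ 9 + 7
  let m : Int := grid.length
  let n : Int := (PySem.List.pyGetD grid 0 []).length
  let f0 := (PySem.List.pyRange 0 (m+1) 1).map (fun _ =>
    (PySem.List.pyRange 0 (n+1) 1).map (fun _ => List.replicate k.toNat (0 : Int)))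
  let f1 := pvSet3 f0 0 0 (PySem.Int.mod (pvG grid 0 0) k)
      (pvGet3 f0 0 0 (PySem.Int.mod (pvG grid 0 0) k) + 1)
  let f := (PySem.List.pyRange 0 m 1).foldl (fun f i =>
      (PySem.List.pyRange 0 n 1).foldl (fun f j =>
        (PySem.List.pyRange 0 k 1).foldl (pvStepL grid k m n i j) f) f) f1
  PySem.Int.mod (pvGet3 f (m-1) (n-1) 0) md

-- ===== PORT B =====
-- B's dp(i, j, r); the memo dict and warm-up loops only cache values of this
-- pure recursion, so the port is the recursion itself
def pvDp (grid : List (List Int)) (k : Int) (i j r : Int) : Int :=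
  if i < 0 ∨ j < 0 then 0
  else if i = 0 ∧ j = 0 then (if r = PySem.Int.mod (pvG grid 0 0) k then 1 else 0)
  else
    let p := PySem.Int.mod (r - pvG grid i j) k
    pvDp grid k (i-1) j p + pvDp grid k i (j-1) p
termination_by (i + j + 2).toNat
decreasing_by all_goals omega

def numberOfPaths_alt (grid : List (List Int)) (k : Int) : Int :=
  let md : Int := 10 ^ 9 + 7
  let m : Int := grid.length
  let n : Int := (PySem.List.pyGetD grid 0 []).length
  PySem.Int.mod (pvDp grid k (m-1) (n-1) 0) md

-- ===== PRECONDITION & SPEC =====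
-- Pre_ excludes exactly the inputs on which the Python A raises: k ≤ 0
-- (ZeroDivisionError for k = 0, IndexError on the empty remainder lists for k < 0),
-- an empty grid or empty first row (IndexError on grid[0][0]), and a row shorter
-- than the first row (IndexError on grid[i][j]).
def Pre_numberOfPaths (grid : List (List Int)) (k : Int) : Prop :=
  1 ≤ k ∧ grid ≠ [] ∧ 1 ≤ (grid.headD []).length ∧
    ∀ row ∈ grid, (grid.headD []).length ≤ row.length
instance (grid : List (List Int)) (k : Int) : Decidable (Pre_numberOfPaths grid k) := by
  unfold Pre_numberOfPaths; infer_instance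

def pvWitness_numberOfPaths : List (List Int) × Int := ([[1, 2], [3, 4]], 3)

def Spec_numberOfPaths (grid : List (List Int)) (k : Int) (out : Int) : Prop := out = numberOfPaths_alt grid k
instance (grid : List (List Int)) (k : Int) (out : Int) : Decidable (Spec_numberOfPaths grid k out) := by unfold Spec_numberOfPaths; infer_instance

-- ===== CLAIM (what is proved, stated in full; the proofs are below) =====
def Claim_equal_numberOfPaths : Prop := ∀ (grid : List (List Int)) (k : Int), Dom_numberOfPaths grid k → Pre_numberOfPaths grid k → Spec_numberOfPaths grid k (numberOfPaths grid k)

-- ===== LEMMAS AND PROOFS =====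

-- ghost function-array view of A's table, used only by the proofs
def pvUpd (F : Int → Int → Int → Int) (i j t v : Int) : Int → Int → Int → Int :=
  fun a b s => if a = i ∧ b = j ∧ s = t then v else F a b s

def pvStepT (grid : List (List Int)) (k m n i j : Int)
    (F : Int → Int → Int → Int) (t : Int) : Int → Int → Int → Int :=
  let F1 := if j + 1 < n then
      let T := PySem.Int.mod (t + pvG grid i (j+1)) k
      let w := F i (j+1) T + F i j t
      pvUpd F i (j+1) T w
    else F
  if i + 1 < m then
      let T := PySem.Int.mod (t + pvG grid (i+1) j) k
      let w := F1 (i+1) j T + F1 i j t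
      pvUpd F1 (i+1) j T w
  else F1

-- loop invariant of A's double loop, standing at row I, column J (the cells
-- already processed are those lexicographically before (I, J)): each in-range
-- table entry is the initial δ plus the contributions already pushed into it
-- from its processed predecessors
def pvINV (grid : List (List Int)) (k m n I J : Int) (F : Int → Int → Int → Int) : Prop :=
  ∀ a b t, 0 ≤ a → a < m → 0 ≤ b → b < n → 0 ≤ t → t < k →
    F a b t = (if a = 0 ∧ b = 0 ∧ t = PySem.Int.mod (pvG grid 0 0) k then 1 else 0)
      + (if 1 ≤ b ∧ (a < I ∨ (a = I ∧ b - 1 < J)) then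
            pvDp grid k a (b-1) (PySem.Int.mod (t - pvG grid a b) k) else 0)
      + (if 1 ≤ a ∧ (a - 1 < I ∨ (a - 1 = I ∧ b < J)) then
            pvDp grid k (a-1) b (PySem.Int.mod (t - pvG grid a b) k) else 0)

lemma pv_mod_nonneg (k x : Int) (hk : 0 < k) : 0 ≤ PySem.Int.mod x k := by
  rw [PySem.Int.mod_eq_emod_of_pos hk]; exact Int.emod_nonneg x (by omega)

lemma pv_mod_lt (k x : Int) (hk : 0 < k) : PySem.Int.mod x k < k := by
  rw [PySem.Int.mod_eq_emod_of_pos hk]; exact Int.emod_lt_of_pos x hk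

-- ((t+g) mod k - g) mod k = t   for t ∈ [0,k)
lemma pv_mod_shift_inv (k t g : Int) (hk : 0 < k) (h0 : 0 ≤ t) (h1 : t < k) :
    PySem.Int.mod (PySem.Int.mod (t + g) k - g) k = t := by
  rw [PySem.Int.mod_eq_emod_of_pos hk, PySem.Int.mod_eq_emod_of_pos hk]
  conv_lhs => rw [Int.sub_emod, Int.emod_emod_of_dvd _ dvd_rfl, ← Int.sub_emod]
  simpa using Int.emod_eq_of_lt h0 h1

-- ((s-g) mod k + g) mod k = s   for s ∈ [0,k)
lemma pv_mod_shift_inv' (k s g : Int) (hk : 0 < k) (h0 : 0 ≤ s) (h1 : s < k) :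
    PySem.Int.mod (PySem.Int.mod (s - g) k + g) k = s := by
  rw [PySem.Int.mod_eq_emod_of_pos hk, PySem.Int.mod_eq_emod_of_pos hk]
  conv_lhs => rw [Int.add_emod, Int.emod_emod_of_dvd _ dvd_rfl, ← Int.add_emod]
  simpa using Int.emod_eq_of_lt h0 h1

lemma pvUpd_pos (F : Int → Int → Int → Int) (i j t v a b s : Int)
    (h : a = i ∧ b = j ∧ s = t) : pvUpd F i j t v a b s = v := if_pos h

lemma pvUpd_neg (F : Int → Int → Int → Int) (i j t v a b s : Int)
    (h : ¬(a = i ∧ b = j ∧ s = t)) : pvUpd F i j t v a b s = F a b s := if_neg h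

-- a '+=' at one entry, as a pointwise formula
lemma pvUpd_add (F : Int → Int → Int → Int) (i1 j1 T1 w a b s : Int) :
    pvUpd F i1 j1 T1 (F i1 j1 T1 + w) a b s =
      F a b s + (if a = i1 ∧ b = j1 ∧ s = T1 then w else 0) := by
  by_cases h : a = i1 ∧ b = j1 ∧ s = T1
  · rw [pvUpd_pos _ _ _ _ _ _ _ _ h, if_pos h]
    obtain ⟨rfl, rfl, rfl⟩ := h; ring
  · rw [pvUpd_neg _ _ _ _ _ _ _ _ h, if_neg h]; ring

-- one-step unfoldings of B's recursion
lemma pvDp_neg (grid : List (List Int)) (k i j r : Int) (h : i < 0 ∨ j < 0) :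
    pvDp grid k i j r = 0 := by
  rw [pvDp, if_pos h]

lemma pvDp_zero (grid : List (List Int)) (k r : Int) :
    pvDp grid k 0 0 r = (if r = PySem.Int.mod (pvG grid 0 0) k then 1 else 0) := by
  rw [pvDp, if_neg (by omega), if_pos ⟨rfl, rfl⟩]

lemma pvDp_step (grid : List (List Int)) (k i j r : Int) (hi : 0 ≤ i) (hj : 0 ≤ j)
    (h : ¬(i = 0 ∧ j = 0)) :
    pvDp grid k i j r =
      pvDp grid k (i-1) j (PySem.Int.mod (r - pvG grid i j) k)
        + pvDp grid k i (j-1) (PySem.Int.mod (r - pvG grid i j) k) := by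
  rw [pvDp, if_neg (by omega), if_neg h]

-- with both predecessors processed the invariant's right-hand side is dp itself
lemma pv_rhs_eq_dp (grid : List (List Int)) (k m n I J : Int) (F : Int → Int → Int → Int)
    (hinv : pvINV grid k m n I J F) (a b t : Int)
    (ha0 : 0 ≤ a) (ham : a < m) (hb0 : 0 ≤ b) (hbn : b < n) (ht0 : 0 ≤ t) (htk : t < k)
    (hL : 1 ≤ b → (a < I ∨ (a = I ∧ b - 1 < J)))
    (hU : 1 ≤ a → (a - 1 < I ∨ (a - 1 = I ∧ b < J))) :
    F a b t = pvDp grid k a b t := by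
  rw [hinv a b t ha0 ham hb0 hbn ht0 htk]
  by_cases h00 : a = 0 ∧ b = 0
  · obtain ⟨rfl, rfl⟩ := h00
    rw [if_neg (show ¬((1:Int) ≤ 0 ∧ _) from fun h => absurd h.1 (by omega)),
        if_neg (show ¬((1:Int) ≤ 0 ∧ _) from fun h => absurd h.1 (by omega)),
        add_zero, add_zero, pvDp_zero]
    by_cases ht : t = PySem.Int.mod (pvG grid 0 0) k
    · rw [if_pos ⟨rfl, rfl, ht⟩, if_pos ht]
    · rw [if_neg (fun h => ht h.2.2), if_neg ht]
  · rw [pvDp_step grid k a b t ha0 hb0 h00,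
        if_neg (fun h => h00 ⟨h.1, h.2.1⟩)]
    by_cases hb1 : 1 ≤ b
    · rw [if_pos ⟨hb1, hL hb1⟩]
      by_cases ha1 : 1 ≤ a
      · rw [if_pos ⟨ha1, hU ha1⟩]; ring
      · rw [if_neg (fun h => ha1 h.1),
            pvDp_neg grid k (a-1) b _ (by omega)]
        ring
    · rw [if_neg (fun h => hb1 h.1),
          pvDp_neg grid k a (b-1) _ (by omega)]
      by_cases ha1 : 1 ≤ a
      · rw [if_pos ⟨ha1, hU ha1⟩]; ring
      · rw [if_neg (fun h => ha1 h.1),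
            pvDp_neg grid k (a-1) b _ (by omega)]
        ring

-- one iteration of the innermost loop, as a pointwise formula
lemma pv_stepT_apply (grid : List (List Int)) (k m n i j t a b s : Int)
    (F : Int → Int → Int → Int) :
    pvStepT grid k m n i j F t a b s =
      F a b s
      + (if j + 1 < n ∧ a = i ∧ b = j + 1 ∧ s = PySem.Int.mod (t + pvG grid i (j+1)) k
           then F i j t else 0)
      + (if i + 1 < m ∧ a = i + 1 ∧ b = j ∧ s = PySem.Int.mod (t + pvG grid (i+1) j) k
           then F i j t else 0) := by
  generalize hT1 : PySem.Int.mod (t + pvG grid i (j+1)) k = T1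
  generalize hT2 : PySem.Int.mod (t + pvG grid (i+1) j) k = T2
  unfold pvStepT
  rw [hT1, hT2]
  by_cases h1 : j + 1 < n <;> by_cases h2 : i + 1 < m <;>
    simp only [h1, h2, true_and, false_and, if_pos, if_neg (not_false), add_zero]
  · rw [show pvUpd F i (j+1) T1 (F i (j+1) T1 + F i j t) i j t = F i j t from
        pvUpd_neg _ _ _ _ _ _ _ _ (by omega)]
    rw [pvUpd_add, pvUpd_add]
  · rw [pvUpd_add]
  · rw [pvUpd_add]

-- the full innermost loop: every remainder class receives exactly one push
lemma pv_foldT (grid : List (List Int)) (k m n i j : Int) (hk : 0 < k)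
    (hi0 : 0 ≤ i) (hj0 : 0 ≤ j) :
    ∀ (c : Int), 0 ≤ c → c ≤ k → ∀ F : Int → Int → Int → Int,
      (∀ t, 0 ≤ t → t < k → F i j t = pvDp grid k i j t) →
      ∀ a b s, 0 ≤ s → s < k →
      ((PySem.List.pyRange c k 1).foldl (pvStepT grid k m n i j) F) a b s =
        F a b s
        + (if j + 1 < n ∧ a = i ∧ b = j + 1 ∧ c ≤ PySem.Int.mod (s - pvG grid i (j+1)) k
             then pvDp grid k i j (PySem.Int.mod (s - pvG grid i (j+1)) k) else 0)
        + (if i + 1 < m ∧ a = i + 1 ∧ b = j ∧ c ≤ PySem.Int.mod (s - pvG grid (i+1) j) k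
             then pvDp grid k i j (PySem.Int.mod (s - pvG grid (i+1) j) k) else 0) := by
  suffices main : ∀ (d : Nat), ∀ c : Int, (k - c).toNat = d → 0 ≤ c → c ≤ k →
      ∀ F : Int → Int → Int → Int,
      (∀ t, 0 ≤ t → t < k → F i j t = pvDp grid k i j t) →
      ∀ a b s, 0 ≤ s → s < k →
      ((PySem.List.pyRange c k 1).foldl (pvStepT grid k m n i j) F) a b s =
        F a b s
        + (if j + 1 < n ∧ a = i ∧ b = j + 1 ∧ c ≤ PySem.Int.mod (s - pvG grid i (j+1)) k
             then pvDp grid k i j (PySem.Int.mod (s - pvG grid i (j+1)) k) else 0)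
        + (if i + 1 < m ∧ a = i + 1 ∧ b = j ∧ c ≤ PySem.Int.mod (s - pvG grid (i+1) j) k
             then pvDp grid k i j (PySem.Int.mod (s - pvG grid (i+1) j) k) else 0) by
    intro c hc0 hck F hF a b s hs0 hsk
    exact main (k - c).toNat c rfl hc0 hck F hF a b s hs0 hsk
  intro d
  induction d with
  | zero =>
    intro c hd hc0 hck F hF a b s hs0 hsk
    have hck' : c = k := by omega
    rw [PySem.List.pyRange_one_eq_nil (by omega), List.foldl_nil]
    have b1 : PySem.Int.mod (s - pvG grid i (j+1)) k < k := pv_mod_lt _ _ hk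
    have b2 : PySem.Int.mod (s - pvG grid (i+1) j) k < k := pv_mod_lt _ _ hk
    rw [if_neg (fun h => absurd h.2.2.2 (by omega)),
        if_neg (fun h => absurd h.2.2.2 (by omega))]
    ring
  | succ d ih =>
    intro c hd hc0 hck F hF a b s hs0 hsk
    have hck' : c < k := by omega
    rw [PySem.List.pyRange_one_cons hck', List.foldl_cons]
    have hF' : ∀ t, 0 ≤ t → t < k →
        (pvStepT grid k m n i j F c) i j t = pvDp grid k i j t := by
      intro t ht0 htk
      rw [pv_stepT_apply, if_neg (fun h => absurd h.2.2.1 (by omega)),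
          if_neg (fun h => absurd h.2.1 (by omega)), add_zero, add_zero]
      exact hF t ht0 htk
    rw [ih (c+1) (by omega) (by omega) (by omega) _ hF' a b s hs0 hsk]
    rw [pv_stepT_apply]
    have hFc : F i j c = pvDp grid k i j c := hF c hc0 hck'
    set gR := pvG grid i (j+1) with hgR
    set gD := pvG grid (i+1) j with hgD
    set M1 := PySem.Int.mod (s - gR) k with hM1
    set M2 := PySem.Int.mod (s - gD) k with hM2
    have hM1a : 0 ≤ M1 := hM1 ▸ pv_mod_nonneg _ _ hk
    have hM1b : M1 < k := hM1 ▸ pv_mod_lt _ _ hk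
    have hM2a : 0 ≤ M2 := hM2 ▸ pv_mod_nonneg _ _ hk
    have hM2b : M2 < k := hM2 ▸ pv_mod_lt _ _ hk
    have e1b : PySem.Int.mod (M1 + gR) k = s := by
      rw [hM1]; exact pv_mod_shift_inv' k s gR hk hs0 hsk
    have e2b : PySem.Int.mod (M2 + gD) k = s := by
      rw [hM2]; exact pv_mod_shift_inv' k s gD hk hs0 hsk
    have e1 : s = PySem.Int.mod (c + gR) k ↔ M1 = c := by
      constructor
      · intro h; rw [hM1, h]; exact pv_mod_shift_inv k c gR hk hc0 hck'
      · intro h; rw [← e1b, h]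
    have e2 : s = PySem.Int.mod (c + gD) k ↔ M2 = c := by
      constructor
      · intro h; rw [hM2, h]; exact pv_mod_shift_inv k c gD hk hc0 hck'
      · intro h; rw [← e2b, h]
    by_cases cA : j + 1 < n ∧ a = i ∧ b = j + 1
    · have cBn : ¬(i + 1 < m ∧ a = i + 1 ∧ b = j) := by
        rintro ⟨_, h2', h3'⟩; have := cA.2.1; omega
      have nB : ∀ X : Prop, ¬(i + 1 < m ∧ a = i + 1 ∧ b = j ∧ X) :=
        fun X h => cBn ⟨h.1, h.2.1, h.2.2.1⟩
      rw [if_neg (nB _), if_neg (nB _), if_neg (nB _)]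
      by_cases hMc : M1 = c
      · rw [if_pos (show j + 1 < n ∧ a = i ∧ b = j + 1 ∧ s = PySem.Int.mod (c + gR) k from ⟨cA.1, cA.2.1, cA.2.2, e1.mpr hMc⟩),
            if_pos (show j + 1 < n ∧ a = i ∧ b = j + 1 ∧ c ≤ M1 from ⟨cA.1, cA.2.1, cA.2.2, by omega⟩),
            if_neg (show ¬(j + 1 < n ∧ a = i ∧ b = j + 1 ∧ c + 1 ≤ M1) from
              fun h => absurd h.2.2.2 (by omega))]
        rw [hFc, hMc]; ring
      · rw [if_neg (show ¬(j + 1 < n ∧ a = i ∧ b = j + 1 ∧ s = PySem.Int.mod (c + gR) k) from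
              fun h => hMc (e1.mp h.2.2.2))]
        by_cases hc1 : c + 1 ≤ M1
        · rw [if_pos (show j + 1 < n ∧ a = i ∧ b = j + 1 ∧ c + 1 ≤ M1 from ⟨cA.1, cA.2.1, cA.2.2, hc1⟩),
              if_pos (show j + 1 < n ∧ a = i ∧ b = j + 1 ∧ c ≤ M1 from ⟨cA.1, cA.2.1, cA.2.2, by omega⟩)]
          ring
        · rw [if_neg (show ¬(j + 1 < n ∧ a = i ∧ b = j + 1 ∧ c + 1 ≤ M1) from
                fun h => absurd h.2.2.2 (by omega)),
              if_neg (show ¬(j + 1 < n ∧ a = i ∧ b = j + 1 ∧ c ≤ M1) from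
                fun h => absurd h.2.2.2 (by omega))]
          ring
    · have nA : ∀ X : Prop, ¬(j + 1 < n ∧ a = i ∧ b = j + 1 ∧ X) :=
        fun X h => cA ⟨h.1, h.2.1, h.2.2.1⟩
      rw [if_neg (nA _), if_neg (nA _), if_neg (nA _)]
      by_cases cB : i + 1 < m ∧ a = i + 1 ∧ b = j
      · by_cases hMc : M2 = c
        · rw [if_pos (show i + 1 < m ∧ a = i + 1 ∧ b = j ∧ s = PySem.Int.mod (c + gD) k from ⟨cB.1, cB.2.1, cB.2.2, e2.mpr hMc⟩),
              if_pos (show i + 1 < m ∧ a = i + 1 ∧ b = j ∧ c ≤ M2 from ⟨cB.1, cB.2.1, cB.2.2, by omega⟩),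
              if_neg (show ¬(i + 1 < m ∧ a = i + 1 ∧ b = j ∧ c + 1 ≤ M2) from
                fun h => absurd h.2.2.2 (by omega))]
          rw [hFc, hMc]; ring
        · rw [if_neg (show ¬(i + 1 < m ∧ a = i + 1 ∧ b = j ∧ s = PySem.Int.mod (c + gD) k) from
                fun h => hMc (e2.mp h.2.2.2))]
          by_cases hc1 : c + 1 ≤ M2
          · rw [if_pos (show i + 1 < m ∧ a = i + 1 ∧ b = j ∧ c + 1 ≤ M2 from ⟨cB.1, cB.2.1, cB.2.2, hc1⟩),
                if_pos (show i + 1 < m ∧ a = i + 1 ∧ b = j ∧ c ≤ M2 from ⟨cB.1, cB.2.1, cB.2.2, by omega⟩)]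
            ring
          · rw [if_neg (show ¬(i + 1 < m ∧ a = i + 1 ∧ b = j ∧ c + 1 ≤ M2) from
                  fun h => absurd h.2.2.2 (by omega)),
                if_neg (show ¬(i + 1 < m ∧ a = i + 1 ∧ b = j ∧ c ≤ M2) from
                  fun h => absurd h.2.2.2 (by omega))]
            ring
      · have nB : ∀ X : Prop, ¬(i + 1 < m ∧ a = i + 1 ∧ b = j ∧ X) :=
          fun X h => cB ⟨h.1, h.2.1, h.2.2.1⟩
        rw [if_neg (nB _), if_neg (nB _), if_neg (nB _)]
        ring

-- processing cell (I, J) advances the invariant one column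
lemma pv_cell_inv (grid : List (List Int)) (k m n I J : Int) (hk : 0 < k)
    (hI0 : 0 ≤ I) (hIm : I < m) (hJ0 : 0 ≤ J) (hJn : J < n)
    (F : Int → Int → Int → Int) (h : pvINV grid k m n I J F) :
    pvINV grid k m n I (J+1)
      ((PySem.List.pyRange 0 k 1).foldl (pvStepT grid k m n I J) F) := by
  have hFij : ∀ t, 0 ≤ t → t < k → F I J t = pvDp grid k I J t := by
    intro t ht0 htk
    exact pv_rhs_eq_dp grid k m n I J F h I J t hI0 hIm hJ0 hJn ht0 htk
      (fun _ => by omega) (fun _ => by omega)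
  intro a b t ha0 ham hb0 hbn ht0 htk
  rw [pv_foldT grid k m n I J hk hI0 hJ0 0 le_rfl (by omega) F hFij a b t ht0 htk]
  rw [h a b t ha0 ham hb0 hbn ht0 htk]
  have p1 : 0 ≤ PySem.Int.mod (t - pvG grid I (J+1)) k := pv_mod_nonneg _ _ hk
  have p2 : 0 ≤ PySem.Int.mod (t - pvG grid (I+1) J) k := pv_mod_nonneg _ _ hk
  by_cases cL : a = I ∧ b = J + 1
  · rw [cL.1, cL.2]
    rw [if_neg (show ¬(I + 1 < m ∧ I = I + 1 ∧ J + 1 = J ∧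
            0 ≤ PySem.Int.mod (t - pvG grid (I+1) J) k) from fun h' => by omega),
        if_pos (show J + 1 < n ∧ I = I ∧ J + 1 = J + 1 ∧
            0 ≤ PySem.Int.mod (t - pvG grid I (J+1)) k from
          ⟨by rw [← cL.2]; exact hbn, rfl, rfl, p1⟩),
        if_pos (show (1:Int) ≤ J + 1 ∧ (I < I ∨ (I = I ∧ J + 1 - 1 < J + 1)) from
          ⟨by omega, by omega⟩),
        if_neg (show ¬((1:Int) ≤ J + 1 ∧ (I < I ∨ (I = I ∧ J + 1 - 1 < J))) from
          fun h' => by omega)]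
    rw [show J + 1 - 1 = J from by omega]
    by_cases ha1 : 1 ≤ I ∧ (I - 1 < I ∨ (I - 1 = I ∧ J + 1 < J))
    · rw [if_pos ha1, if_pos (show (1:Int) ≤ I ∧ (I - 1 < I ∨ (I - 1 = I ∧ J + 1 < J + 1))
          from ⟨ha1.1, by omega⟩)]
      ring
    · rw [if_neg ha1, if_neg (show ¬((1:Int) ≤ I ∧ (I - 1 < I ∨ (I - 1 = I ∧ J + 1 < J + 1)))
          from fun h' => ha1 ⟨h'.1, by omega⟩)]
      ring
  · rw [if_neg (show ¬(J + 1 < n ∧ a = I ∧ b = J + 1 ∧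
          0 ≤ PySem.Int.mod (t - pvG grid I (J+1)) k) from
        fun h' => cL ⟨h'.2.1, h'.2.2.1⟩)]
    by_cases cU : a = I + 1 ∧ b = J
    · rw [cU.1, cU.2]
      rw [if_pos (show I + 1 < m ∧ I + 1 = I + 1 ∧ J = J ∧
              0 ≤ PySem.Int.mod (t - pvG grid (I+1) J) k from
            ⟨by rw [← cU.1]; exact ham, rfl, rfl, p2⟩),
          if_pos (show (1:Int) ≤ I + 1 ∧ (I + 1 - 1 < I ∨ (I + 1 - 1 = I ∧ J < J + 1)) from
            ⟨by omega, by omega⟩),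
          if_neg (show ¬((1:Int) ≤ I + 1 ∧ (I + 1 - 1 < I ∨ (I + 1 - 1 = I ∧ J < J))) from
            fun h' => by omega)]
      rw [show I + 1 - 1 = I from by omega]
      by_cases hb1 : 1 ≤ J ∧ (I + 1 < I ∨ (I + 1 = I ∧ J - 1 < J))
      · rw [if_pos hb1, if_pos (show (1:Int) ≤ J ∧ (I + 1 < I ∨ (I + 1 = I ∧ J - 1 < J + 1))
            from ⟨hb1.1, by omega⟩)]
        ring
      · rw [if_neg hb1, if_neg (show ¬((1:Int) ≤ J ∧ (I + 1 < I ∨ (I + 1 = I ∧ J - 1 < J + 1)))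
            from fun h' => hb1 ⟨h'.1, by omega⟩)]
        ring
    · rw [if_neg (show ¬(I + 1 < m ∧ a = I + 1 ∧ b = J ∧
            0 ≤ PySem.Int.mod (t - pvG grid (I+1) J) k) from
          fun h' => cU ⟨h'.2.1, h'.2.2.1⟩)]
      have eL : (1 ≤ b ∧ (a < I ∨ (a = I ∧ b - 1 < J + 1))) ↔
          (1 ≤ b ∧ (a < I ∨ (a = I ∧ b - 1 < J))) := by
        constructor <;> rintro ⟨hb1, h2⟩
        · refine ⟨hb1, ?_⟩
          rcases h2 with h2 | ⟨h2a, h2b⟩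
          · exact Or.inl h2
          · right
            refine ⟨h2a, ?_⟩
            by_contra hc
            exact cL ⟨h2a, by omega⟩
        · refine ⟨hb1, ?_⟩
          rcases h2 with h2 | ⟨h2a, h2b⟩
          · exact Or.inl h2
          · exact Or.inr ⟨h2a, by omega⟩
      have eU : (1 ≤ a ∧ (a - 1 < I ∨ (a - 1 = I ∧ b < J + 1))) ↔
          (1 ≤ a ∧ (a - 1 < I ∨ (a - 1 = I ∧ b < J))) := by
        constructor <;> rintro ⟨ha1, h2⟩
        · refine ⟨ha1, ?_⟩
          rcases h2 with h2 | ⟨h2a, h2b⟩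
          · exact Or.inl h2
          · right
            refine ⟨h2a, ?_⟩
            by_contra hc
            exact cU ⟨by omega, by omega⟩
        · refine ⟨ha1, ?_⟩
          rcases h2 with h2 | ⟨h2a, h2b⟩
          · exact Or.inl h2
          · exact Or.inr ⟨h2a, by omega⟩
      simp only [eL, eU]
      ring

-- finishing a row is the same processed set as standing at the start of the next
lemma pv_inv_row_end (grid : List (List Int)) (k m n I : Int)
    (F : Int → Int → Int → Int) (h : pvINV grid k m n I n F) :
    pvINV grid k m n (I+1) 0 F := by
  intro a b t ha0 ham hb0 hbn ht0 htk
  rw [h a b t ha0 ham hb0 hbn ht0 htk]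
  have eL : (1 ≤ b ∧ (a < I ∨ (a = I ∧ b - 1 < n))) ↔
      (1 ≤ b ∧ (a < I + 1 ∨ (a = I + 1 ∧ b - 1 < 0))) := by omega
  have eU : (1 ≤ a ∧ (a - 1 < I ∨ (a - 1 = I ∧ b < n))) ↔
      (1 ≤ a ∧ (a - 1 < I + 1 ∨ (a - 1 = I + 1 ∧ b < 0))) := by omega
  simp only [eL, eU]

-- the inner j-loop keeps the invariant, to the end of the row
lemma pv_row_fold (grid : List (List Int)) (k m n I : Int) (hk : 0 < k)
    (hI0 : 0 ≤ I) (hIm : I < m) :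
    ∀ (J : Int), 0 ≤ J → J ≤ n → ∀ F : Int → Int → Int → Int, pvINV grid k m n I J F →
      pvINV grid k m n I n
        ((PySem.List.pyRange J n 1).foldl
          (fun F j => (PySem.List.pyRange 0 k 1).foldl (pvStepT grid k m n I j) F) F) := by
  suffices main : ∀ (d : Nat), ∀ J : Int, (n - J).toNat = d → 0 ≤ J → J ≤ n →
      ∀ F : Int → Int → Int → Int, pvINV grid k m n I J F →
      pvINV grid k m n I n
        ((PySem.List.pyRange J n 1).foldl
          (fun F j => (PySem.List.pyRange 0 k 1).foldl (pvStepT grid k m n I j) F) F) by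
    intro J hJ0 hJn F hF
    exact main (n - J).toNat J rfl hJ0 hJn F hF
  intro d
  induction d with
  | zero =>
    intro J hd hJ0 hJn F hF
    have hJn' : J = n := by omega
    subst hJn'
    rw [PySem.List.pyRange_one_eq_nil le_rfl, List.foldl_nil]
    exact hF
  | succ d ih =>
    intro J hd hJ0 hJn F hF
    have hJn' : J < n := by omega
    rw [PySem.List.pyRange_one_cons hJn', List.foldl_cons]
    exact ih (J+1) (by omega) (by omega) (by omega) _
      (pv_cell_inv grid k m n I J hk hI0 hIm hJ0 hJn' F hF)

-- the outer i-loop keeps the invariant, to the end of the grid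
lemma pv_all_fold (grid : List (List Int)) (k m n : Int) (hk : 0 < k) (hn : 0 < n) :
    ∀ (I : Int), 0 ≤ I → I ≤ m → ∀ F : Int → Int → Int → Int, pvINV grid k m n I 0 F →
      pvINV grid k m n m 0
        ((PySem.List.pyRange I m 1).foldl (fun F i =>
          (PySem.List.pyRange 0 n 1).foldl
            (fun F j => (PySem.List.pyRange 0 k 1).foldl (pvStepT grid k m n i j) F) F) F) := by
  suffices main : ∀ (d : Nat), ∀ I : Int, (m - I).toNat = d → 0 ≤ I → I ≤ m →
      ∀ F : Int → Int → Int → Int, pvINV grid k m n I 0 F →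
      pvINV grid k m n m 0
        ((PySem.List.pyRange I m 1).foldl (fun F i =>
          (PySem.List.pyRange 0 n 1).foldl
            (fun F j => (PySem.List.pyRange 0 k 1).foldl (pvStepT grid k m n i j) F) F) F) by
    intro I hI0 hIm F hF
    exact main (m - I).toNat I rfl hI0 hIm F hF
  intro d
  induction d with
  | zero =>
    intro I hd hI0 hIm F hF
    have hIm' : I = m := by omega
    subst hIm'
    rw [PySem.List.pyRange_one_eq_nil le_rfl, List.foldl_nil]
    exact hF
  | succ d ih =>
    intro I hd hI0 hIm F hF
    have hIm' : I < m := by omega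
    rw [PySem.List.pyRange_one_cons hIm', List.foldl_cons]
    exact ih (I+1) (by omega) (by omega) (by omega) _
      (pv_inv_row_end grid k m n I _
        (pv_row_fold grid k m n I hk hI0 hIm' 0 le_rfl (by omega) F hF))

def pvShape (m n k : Int) (f : List (List (List Int))) : Prop :=
  (f.length : Int) = m + 1 ∧ ∀ r ∈ f, (r.length : Int) = n + 1 ∧ ∀ c ∈ r, (c.length : Int) = k

lemma pv_gs {α : Type} (xs : List α) (i j : Int) (v d : α)
    (hi0 : 0 ≤ i) (hil : i < (xs.length : Int)) (hj0 : 0 ≤ j) (hjl : j < (xs.length : Int)) :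
    PySem.List.pyGetD (PySem.List.pySetD xs i v) j d =
      if j = i then v else PySem.List.pyGetD xs j d := by
  rw [PySem.List.pySetD_of_nonneg xs v hi0]
  rw [PySem.List.pyGetD_eq_getElem _ _ hj0 (by simpa using hjl)]
  rw [List.getElem_set]
  by_cases h : j = i
  · rw [if_pos (by omega), if_pos h]
  · rw [if_neg (by omega), if_neg h, PySem.List.pyGetD_eq_getElem _ _ hj0 hjl]

lemma pv_row_mem {α : Type} (xs : List α) (d : α) (i : Int)
    (hi0 : 0 ≤ i) (hil : i < (xs.length : Int)) :
    PySem.List.pyGetD xs i d ∈ xs := by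
  rw [PySem.List.pyGetD_eq_getElem _ _ hi0 hil]
  exact List.getElem_mem _

lemma pv_shape_set3 (m n k : Int) (f : List (List (List Int)))
    (hsh : pvShape m n k f) (i j t v : Int)
    (hi0 : 0 ≤ i) (hil : i < m + 1) (hj0 : 0 ≤ j) (hjl : j < n + 1)
    (ht0 : 0 ≤ t) (htk : t < k) :
    pvShape m n k (pvSet3 f i j t v) := by
  obtain ⟨hfl, hrows⟩ := hsh
  have hrm : PySem.List.pyGetD f i [] ∈ f := pv_row_mem f [] i hi0 (by omega)
  obtain ⟨hrl, hcells⟩ := hrows _ hrm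
  have hcm : PySem.List.pyGetD (PySem.List.pyGetD f i []) j [] ∈ PySem.List.pyGetD f i [] :=
    pv_row_mem _ [] j hj0 (by omega)
  have hcl := hcells _ hcm
  unfold pvSet3
  constructor
  · rw [PySem.List.length_pySetD]; exact hfl
  · intro r hr
    rw [PySem.List.pySetD_of_nonneg _ _ hi0] at hr
    rcases List.mem_or_eq_of_mem_set hr with hr | hr
    · exact hrows r hr
    · subst hr
      constructor
      · rw [PySem.List.length_pySetD]; exact hrl
      · intro c hc
        rw [PySem.List.pySetD_of_nonneg _ _ hj0] at hc
        rcases List.mem_or_eq_of_mem_set hc with hc | hc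
        · exact hcells c hc
        · subst hc
          rw [PySem.List.length_pySetD]; exact hcl

lemma pv_get3_set3 (m n k : Int) (f : List (List (List Int)))
    (hsh : pvShape m n k f) (i j t v a b s : Int)
    (hi0 : 0 ≤ i) (hil : i < m + 1) (hj0 : 0 ≤ j) (hjl : j < n + 1)
    (ht0 : 0 ≤ t) (htk : t < k)
    (ha0 : 0 ≤ a) (hal : a < m + 1) (hb0 : 0 ≤ b) (hbl : b < n + 1)
    (hs0 : 0 ≤ s) (hsk : s < k) :
    pvGet3 (pvSet3 f i j t v) a b s =
      if a = i ∧ b = j ∧ s = t then v else pvGet3 f a b s := by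
  obtain ⟨hfl, hrows⟩ := hsh
  have hrm : PySem.List.pyGetD f i [] ∈ f := pv_row_mem f [] i hi0 (by omega)
  obtain ⟨hrl, hcells⟩ := hrows _ hrm
  have hcm : PySem.List.pyGetD (PySem.List.pyGetD f i []) j [] ∈ PySem.List.pyGetD f i [] :=
    pv_row_mem _ [] j hj0 (by omega)
  have hcl := hcells _ hcm
  unfold pvSet3 pvGet3
  rw [pv_gs f i a _ [] hi0 (by omega) ha0 (by omega)]
  by_cases ha : a = i
  · rw [if_pos ha]
    rw [pv_gs _ j b _ [] hj0 (by omega) hb0 (by omega)]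
    by_cases hb : b = j
    · rw [if_pos hb]
      rw [pv_gs _ t s _ 0 ht0 (by omega) hs0 (by omega)]
      by_cases hs : s = t
      · rw [if_pos hs, if_pos ⟨ha, hb, hs⟩]
      · rw [if_neg hs, if_neg (fun h => hs h.2.2), ha, hb]
    · rw [if_neg hb, if_neg (fun h => hb h.2.1), ha]
  · rw [if_neg ha, if_neg (fun h => ha h.1)]

lemma pv_mod_nonneg' (k x : Int) (hk : 0 < k) : 0 ≤ PySem.Int.mod x k := by
  rw [PySem.Int.mod_eq_emod_of_pos hk]; exact Int.emod_nonneg x (by omega)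
lemma pv_mod_lt' (k x : Int) (hk : 0 < k) : PySem.Int.mod x k < k := by
  rw [PySem.Int.mod_eq_emod_of_pos hk]; exact Int.emod_lt_of_pos x hk


def pvRel (m n k : Int) (f : List (List (List Int))) (F : Int → Int → Int → Int) : Prop :=
  pvShape m n k f ∧ ∀ a b s : Int, 0 ≤ a → a < m + 1 → 0 ≤ b → b < n + 1 →
    0 ≤ s → s < k → pvGet3 f a b s = F a b s

-- one '+=' preserves the simulation
lemma pv_write_rel (m n k : Int) (f : List (List (List Int))) (F : Int → Int → Int → Int)
    (h : pvRel m n k f F) (i' j' t' wL wF : Int) (hw : wL = wF)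
    (hi0 : 0 ≤ i') (hil : i' < m + 1) (hj0 : 0 ≤ j') (hjl : j' < n + 1)
    (ht0 : 0 ≤ t') (htk : t' < k) :
    pvRel m n k (pvSet3 f i' j' t' (pvGet3 f i' j' t' + wL))
      (pvUpd F i' j' t' (F i' j' t' + wF)) := by
  subst hw
  obtain ⟨hsh, hrd⟩ := h
  constructor
  · exact pv_shape_set3 m n k f hsh i' j' t' _ hi0 hil hj0 hjl ht0 htk
  · intro a b s ha0 hal hb0 hbl hs0 hsk
    rw [pv_get3_set3 m n k f hsh i' j' t' _ a b s hi0 hil hj0 hjl ht0 htk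
        ha0 hal hb0 hbl hs0 hsk]
    unfold pvUpd
    by_cases hc : a = i' ∧ b = j' ∧ s = t'
    · rw [if_pos hc, if_pos hc, hrd i' j' t' hi0 hil hj0 hjl ht0 htk]
    · rw [if_neg hc, if_neg hc, hrd a b s ha0 hal hb0 hbl hs0 hsk]

lemma pv_step_rel (grid : List (List Int)) (m n k : Int) (hk : 0 < k)
    (i j t : Int) (hi0 : 0 ≤ i) (him : i < m) (hj0 : 0 ≤ j) (hjn : j < n)
    (ht0 : 0 ≤ t) (htk : t < k)
    (f : List (List (List Int))) (F : Int → Int → Int → Int) (h : pvRel m n k f F) :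
    pvRel m n k (pvStepL grid k m n i j f t) (pvStepT grid k m n i j F t) := by
  unfold pvStepL pvStepT
  by_cases h1 : j + 1 < n <;> by_cases h2 : i + 1 < m <;>
      simp only [h1, h2, if_pos, if_neg (not_false)]
  · have hr1 := pv_write_rel m n k f F h i (j+1) (PySem.Int.mod (t + pvG grid i (j+1)) k)
      (pvGet3 f i j t) (F i j t)
      (h.2 i j t hi0 (by omega) hj0 (by omega) ht0 htk)
      hi0 (by omega) (by omega) (by omega) (pv_mod_nonneg' _ _ hk) (pv_mod_lt' _ _ hk)
    exact pv_write_rel m n k _ _ hr1 (i+1) j (PySem.Int.mod (t + pvG grid (i+1) j) k)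
      (pvGet3 (pvSet3 f i (j+1) (PySem.Int.mod (t + pvG grid i (j+1)) k)
        (pvGet3 f i (j+1) (PySem.Int.mod (t + pvG grid i (j+1)) k) + pvGet3 f i j t)) i j t)
      (pvUpd F i (j+1) (PySem.Int.mod (t + pvG grid i (j+1)) k)
        (F i (j+1) (PySem.Int.mod (t + pvG grid i (j+1)) k) + F i j t) i j t)
      (hr1.2 i j t hi0 (by omega) hj0 (by omega) ht0 htk)
      (by omega) (by omega) hj0 (by omega) (pv_mod_nonneg' _ _ hk) (pv_mod_lt' _ _ hk)
  · exact pv_write_rel m n k f F h i (j+1) _ (pvGet3 f i j t) (F i j t)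
      (h.2 i j t hi0 (by omega) hj0 (by omega) ht0 htk)
      hi0 (by omega) (by omega) (by omega) (pv_mod_nonneg' _ _ hk) (pv_mod_lt' _ _ hk)
  · exact pv_write_rel m n k f F h (i+1) j _ (pvGet3 f i j t) (F i j t)
      (h.2 i j t hi0 (by omega) hj0 (by omega) ht0 htk)
      (by omega) (by omega) hj0 (by omega) (pv_mod_nonneg' _ _ hk) (pv_mod_lt' _ _ hk)
  · exact h

lemma pv_foldl_rel {A B γ : Type} (R : A → B → Prop) (g : A → γ → A) (h : B → γ → B)
    (L : List γ) (hstep : ∀ c ∈ L, ∀ x y, R x y → R (g x c) (h y c)) :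
    ∀ x y, R x y → R (L.foldl g x) (L.foldl h y) := by
  induction L with
  | nil => intro x y hxy; exact hxy
  | cons c L ih =>
    intro x y hxy
    exact ih (fun c' hc' => hstep c' (List.mem_cons_of_mem c hc'))
      (g x c) (h y c) (hstep c List.mem_cons_self x y hxy)


-- the freshly built zero table reads 0 everywhere in range
lemma pv_get3_init (m n k a b s : Int)
    (ha0 : 0 ≤ a) (hal : a < m + 1) (hb0 : 0 ≤ b) (hbl : b < n + 1)
    (hs0 : 0 ≤ s) (hsk : s < k) :
    pvGet3 ((PySem.List.pyRange 0 (m+1) 1).map (fun _ =>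
      (PySem.List.pyRange 0 (n+1) 1).map (fun _ => List.replicate k.toNat (0 : Int))))
      a b s = 0 := by
  unfold pvGet3
  rw [PySem.List.pyGetD_map_pyRange_of_nonneg _ (m+1) a _ ha0 hal,
      PySem.List.pyGetD_map_pyRange_of_nonneg _ (n+1) b _ hb0 hbl,
      PySem.List.pyGetD_eq_getElem _ _ hs0 (by simp; omega),
      List.getElem_replicate]

lemma pv_shape_init (m n k : Int) (hm : 0 ≤ m) (hn : 0 ≤ n) (hk : 0 ≤ k) :
    pvShape m n k ((PySem.List.pyRange 0 (m+1) 1).map (fun _ =>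
      (PySem.List.pyRange 0 (n+1) 1).map (fun _ => List.replicate k.toNat (0 : Int)))) := by
  constructor
  · rw [List.length_map, PySem.List.length_pyRange_one]; omega
  · intro r hr
    obtain ⟨_, _, rfl⟩ := List.mem_map.mp hr
    constructor
    · rw [List.length_map, PySem.List.length_pyRange_one]; omega
    · intro c hc
      obtain ⟨_, _, rfl⟩ := List.mem_map.mp hc
      rw [List.length_replicate]; omega

-- ===== VERDICT (by name: the statement is the Claim_ definition above) =====
theorem numberOfPaths_spec : Claim_equal_numberOfPaths := by
  unfold Claim_equal_numberOfPaths
  intro grid k _ hpre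
  obtain ⟨hk1, hne, hn1, _⟩ := hpre
  have hk : 0 < k := by omega
  have hm : 0 < (grid.length : Int) := by
    cases grid with
    | nil => exact absurd rfl hne
    | cons x xs => simp
  have hhead : PySem.List.pyGetD grid 0 ([] : List Int) = grid.headD [] := by
    rw [PySem.List.pyGetD_zero]
    cases grid <;> rfl
  have hn : 0 < ((PySem.List.pyGetD grid 0 ([] : List Int)).length : Int) := by
    rw [hhead]; exact_mod_cast hn1
  set m : Int := (grid.length : Int) with hmdef
  set n : Int := ((PySem.List.pyGetD grid 0 ([] : List Int)).length : Int) with hndef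
  set T0 : Int := PySem.Int.mod (pvG grid 0 0) k with hT0def
  have hT0a : 0 ≤ T0 := hT0def ▸ pv_mod_nonneg' _ _ hk
  have hT0b : T0 < k := hT0def ▸ pv_mod_lt' _ _ hk
  set f0 : List (List (List Int)) := (PySem.List.pyRange 0 (m+1) 1).map (fun _ =>
    (PySem.List.pyRange 0 (n+1) 1).map (fun _ => List.replicate k.toNat (0 : Int)))
    with hf0def
  have hsh0 : pvShape m n k f0 := hf0def ▸ pv_shape_init m n k (by omega) (by omega) (by omega)
  set F0 : Int → Int → Int → Int := pvUpd (fun _ _ _ => 0) 0 0 T0 (0 + 1) with hF0def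
  -- simulation between the list table and the ghost function table, at the start
  have hrel0 : pvRel m n k (pvSet3 f0 0 0 T0 (pvGet3 f0 0 0 T0 + 1)) F0 := by
    constructor
    · exact pv_shape_set3 m n k f0 hsh0 0 0 T0 _ (by omega) (by omega) (by omega) (by omega)
        hT0a hT0b
    · intro a b s ha0 hal hb0 hbl hs0 hsk
      rw [pv_get3_set3 m n k f0 hsh0 0 0 T0 _ a b s (by omega) (by omega) (by omega) (by omega)
          hT0a hT0b ha0 hal hb0 hbl hs0 hsk, hF0def]
      unfold pvUpd
      by_cases hc : a = 0 ∧ b = 0 ∧ s = T0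
      · rw [if_pos hc, if_pos hc, hf0def]
        rw [pv_get3_init m n k 0 0 T0 (by omega) (by omega) (by omega) (by omega) hT0a hT0b]
      · rw [if_neg hc, if_neg hc, hf0def]
        exact pv_get3_init m n k a b s ha0 hal hb0 hbl hs0 hsk
  -- simulation after the whole triple loop
  have hrelF : pvRel m n k
      ((PySem.List.pyRange 0 m 1).foldl (fun f i =>
        (PySem.List.pyRange 0 n 1).foldl (fun f j =>
          (PySem.List.pyRange 0 k 1).foldl (pvStepL grid k m n i j) f) f)
        (pvSet3 f0 0 0 T0 (pvGet3 f0 0 0 T0 + 1)))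
      ((PySem.List.pyRange 0 m 1).foldl (fun F i =>
        (PySem.List.pyRange 0 n 1).foldl (fun F j =>
          (PySem.List.pyRange 0 k 1).foldl (pvStepT grid k m n i j) F) F) F0) := by
    refine pv_foldl_rel (pvRel m n k) _ _ _ (fun i hi x y hxy => ?_) _ _ hrel0
    obtain ⟨hi0, him⟩ := PySem.List.mem_pyRange_one.mp hi
    refine pv_foldl_rel (pvRel m n k) _ _ _ (fun j hj x' y' hxy' => ?_) _ _ hxy
    obtain ⟨hj0, hjn⟩ := PySem.List.mem_pyRange_one.mp hj
    refine pv_foldl_rel (pvRel m n k) _ _ _ (fun t ht x'' y'' hxy'' => ?_) _ _ hxy'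
    obtain ⟨ht0, htk⟩ := PySem.List.mem_pyRange_one.mp ht
    exact pv_step_rel grid m n k hk i j t hi0 him hj0 hjn ht0 htk x'' y'' hxy''
  -- the ghost table satisfies the invariant machinery
  have hbase : pvINV grid k m n 0 0 F0 := by
    intro a b t ha0 ham hb0 hbn ht0 htk
    rw [if_neg (show ¬(1 ≤ b ∧ (a < 0 ∨ (a = 0 ∧ b - 1 < 0))) from fun h' => by omega),
        if_neg (show ¬(1 ≤ a ∧ (a - 1 < 0 ∨ (a - 1 = 0 ∧ b < 0))) from fun h' => by omega),
        add_zero, add_zero, hF0def]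
    by_cases hc : a = 0 ∧ b = 0 ∧ t = T0
    · rw [pvUpd_pos _ _ _ _ _ _ _ _ hc, if_pos (hT0def ▸ hc)]
      norm_num
    · rw [pvUpd_neg _ _ _ _ _ _ _ _ hc, if_neg (hT0def ▸ hc)]
  have hfin := pv_all_fold grid k m n hk hn 0 le_rfl (by omega) _ hbase
  have hval := pv_rhs_eq_dp grid k m n m 0 _ hfin (m-1) (n-1) 0
      (by omega) (by omega) (by omega) (by omega) le_rfl hk
      (fun _ => Or.inl (by omega)) (fun _ => Or.inl (by omega))
  unfold Spec_numberOfPaths numberOfPaths numberOfPaths_alt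
  simp only []
  rw [← hmdef, ← hndef, ← hT0def, ← hf0def]
  rw [hrelF.2 (m-1) (n-1) 0 (by omega) (by omega) (by omega) (by omega) le_rfl hk]
  rw [hval]
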